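-- pv_equiv track=rewrite | github.com/uathena1991/Leetcode | Interview coding problems/gray number_two numbers.py | isgray
-- ===== SOURCE A (Python) =====
-- def isgray(x,y):
-- 	"""
-- 	judge if two values are gray numbers or not.
-- 	:param x: in binary format
-- 	:param y: in binary format
-- 	:return: True or False
-- 	"""
-- 	res1 = x ^ y
-- 	count = 0
-- 	while res1 != 0:
-- 		res1,remain = divmod(res1,2)
-- 		if remain == 1:
-- 			count += 1
-- 	return count == 1
-- ===== SOURCE B (Python) =====
-- def isgray(x, y):
--     # Two numbers differ in exactly one bit iff their xor is a power of two.
--     z = x ^ y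
--     return z > 0 and (z & (z - 1)) == 0
-- ===== Notes on version B (the rewrite author's own statement) =====
-- stated objective: simpler
-- what changed: Replaces the divmod-over-every-bit counting loop with the one-line power-of-two test z > 0 and z & (z-1) == 0 on z = x ^ y; Pre_ excludes x ^ y < 0, where A's while loop never terminates (divmod(-1,2) = (-1,1)) so A returns nothing.
-- outside the precondition, e.g. on isgray(-1, 1): A does not finish within the time limit, B returns False
import Mathlib
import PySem

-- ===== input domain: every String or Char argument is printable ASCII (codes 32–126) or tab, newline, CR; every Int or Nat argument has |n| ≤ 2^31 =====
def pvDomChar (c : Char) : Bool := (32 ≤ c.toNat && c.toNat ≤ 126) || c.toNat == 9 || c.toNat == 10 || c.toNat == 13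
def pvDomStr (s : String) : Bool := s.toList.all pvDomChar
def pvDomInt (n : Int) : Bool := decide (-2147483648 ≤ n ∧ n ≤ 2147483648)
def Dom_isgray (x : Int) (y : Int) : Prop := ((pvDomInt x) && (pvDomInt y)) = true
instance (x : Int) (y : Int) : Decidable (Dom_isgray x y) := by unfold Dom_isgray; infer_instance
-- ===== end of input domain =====

-- B replaces A's divmod bit-counting loop by the one-line power-of-two test on x ^ y;
-- Pre_ excludes x ^ y < 0, where A's while loop never terminates.


-- ===== PORT A =====
-- the while loop of A; fuel only makes the recursion total (enough fuel on every input Pre_ admits)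
def isgrayLoop (fuel : Nat) (res1 : Int) (count : Int) : Int :=
  match fuel with
  | 0 => count
  | fuel + 1 =>
    if res1 ≠ 0 then
      isgrayLoop fuel (PySem.Int.floordiv res1 2)
        (if PySem.Int.mod res1 2 = 1 then count + 1 else count)
    else count

def isgray (x : Int) (y : Int) : Bool :=
  let res1 := PySem.Int.bxor x y
  isgrayLoop (res1.natAbs + 1) res1 0 == 1

-- ===== PORT B =====
def isgray_alt (x : Int) (y : Int) : Bool :=
  let z := PySem.Int.bxor x y
  decide (z > 0) && (PySem.Int.band z (z - 1) == 0)

-- ===== PRECONDITION & SPEC =====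
-- Pre_ excludes x ^ y < 0: there divmod(res1, 2) yields remainder 1 and quotient ≥ res1
-- forever (divmod(-1, 2) = (-1, 1)), so A's while loop never terminates and A returns nothing.
def Pre_isgray (x : Int) (y : Int) : Prop := 0 ≤ PySem.Int.bxor x y
instance (x : Int) (y : Int) : Decidable (Pre_isgray x y) := by unfold Pre_isgray; infer_instance

def pvWitness_isgray : Int × Int := (6, 4)

def Spec_isgray (x : Int) (y : Int) (out : Bool) : Prop := out = isgray_alt x y
instance (x : Int) (y : Int) (out : Bool) : Decidable (Spec_isgray x y out) := by unfold Spec_isgray; infer_instance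

-- ===== CLAIM (what is proved, stated in full; the proofs are below) =====
def Claim_equal_isgray : Prop := ∀ (x : Int) (y : Int), Dom_isgray x y → Pre_isgray x y → Spec_isgray x y (isgray x y)

-- ===== LEMMAS AND PROOFS =====

-- bit-counting characterisation of A's loop, on nonnegative res1
theorem isgrayLoop_eq_bitCount (fuel : Nat) : ∀ (n : Nat) (c : Int), n < fuel →
    isgrayLoop fuel (n : Int) c = c + (PySem.Int.bitCount (n : Int) : Int) := by
  induction fuel with
  | zero => intro n c h; omega
  | succ fuel ih =>
    intro n c h
    by_cases hn : n = 0
    · subst hn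
      simp [isgrayLoop, PySem.Int.bitCount_zero]
    · have hpos : 0 < n := Nat.pos_of_ne_zero hn
      have hcast : ((n : Int) ≠ 0) := by exact_mod_cast hn
      have hfd : PySem.Int.floordiv ((n : Int)) 2 = ((n / 2 : Nat) : Int) := by
        exact_mod_cast PySem.Int.floordiv_natCast n 2
      have hmd : PySem.Int.mod ((n : Int)) 2 = ((n % 2 : Nat) : Int) := by
        exact_mod_cast PySem.Int.mod_natCast n 2
      rw [isgrayLoop, if_pos hcast, hfd, hmd, ih (n / 2) _ (by omega),
        PySem.Int.bitCount_natCast hpos]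
      rcases Nat.mod_two_eq_zero_or_one n with h2 | h2 <;> rw [h2] <;> simp [add_assoc]

-- (2k+1) &&& 2k = 2k : the low bit of an odd number is the only bit its predecessor lacks
theorem land_odd_pred (k : Nat) : (2 * k + 1) &&& (2 * k) = 2 * k := by
  apply Nat.eq_of_testBit_eq
  intro i
  cases i with
  | zero => simp [Nat.testBit_zero]
  | succ i =>
    have h1 : (2 * k + 1) / 2 = k := by omega
    have h2 : 2 * k / 2 = k := by omega
    rw [Nat.testBit_land, Nat.testBit_succ, Nat.testBit_succ, h1, h2, Bool.and_self]

-- 2k &&& (2k - 1) = 2 * (k &&& (k - 1)) for k ≥ 1 : clearing the lowest set bit commutes with doubling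
theorem land_even_pred (k : Nat) (hk : 0 < k) : (2 * k) &&& (2 * k - 1) = 2 * (k &&& (k - 1)) := by
  apply Nat.eq_of_testBit_eq
  intro i
  cases i with
  | zero =>
    simp [Nat.testBit_zero]
  | succ i =>
    have h1 : 2 * k / 2 = k := by omega
    have h2 : (2 * k - 1) / 2 = k - 1 := by omega
    have h3 : 2 * (k &&& (k - 1)) / 2 = k &&& (k - 1) := by omega
    rw [Nat.testBit_land, Nat.testBit_succ, Nat.testBit_succ, Nat.testBit_succ,
      h1, h2, h3, Nat.testBit_land]

theorem bitCount_eq_zero_iff (n : Nat) : PySem.Int.bitCount (n : Int) = 0 ↔ n = 0 := by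
  induction n using Nat.strong_induction_on with
  | _ n ih =>
    rcases Nat.eq_zero_or_pos n with h | h
    · subst h; simp [PySem.Int.bitCount_zero]
    · rw [PySem.Int.bitCount_natCast h]
      rcases Nat.mod_two_eq_zero_or_one n with h2 | h2
      · have hhalf : 0 < n / 2 := by omega
        rw [h2, Nat.zero_add, ih (n / 2) (by omega)]
        omega
      · rw [h2]; omega

-- the heart of the equivalence: z & (z-1) == 0 tests popcount == 1 on positive z
theorem land_pred_eq_zero_iff (n : Nat) (hn : 0 < n) :
    (n &&& (n - 1) = 0) ↔ PySem.Int.bitCount (n : Int) = 1 := by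
  induction n using Nat.strong_induction_on with
  | _ n ih =>
    rw [PySem.Int.bitCount_natCast hn]
    rcases Nat.mod_two_eq_zero_or_one n with h2 | h2
    · -- n even, n = 2 * (n/2), n/2 ≥ 1
      have hk : 0 < n / 2 := by omega
      have hn2 : n = 2 * (n / 2) := by omega
      rw [h2, Nat.zero_add]
      have key : n &&& (n - 1) = 2 * ((n / 2) &&& (n / 2 - 1)) := by
        conv_lhs => rw [hn2]
        exact land_even_pred _ hk
      rw [key]
      constructor
      · intro h
        exact (ih (n / 2) (by omega) hk).1 (by omega)
      · intro h
        rw [(ih (n / 2) (by omega) hk).2 h]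
    · -- n odd, n = 2 * (n/2) + 1
      have hn2 : n = 2 * (n / 2) + 1 := by omega
      have hpred : n - 1 = 2 * (n / 2) := by omega
      rw [h2]
      have key : n &&& (n - 1) = 2 * (n / 2) := by
        conv_lhs => rw [hn2]
        rw [Nat.add_sub_cancel]
        exact land_odd_pred _
      constructor
      · intro h
        rw [key] at h
        have hz : n / 2 = 0 := by omega
        rw [hz]
        simp [PySem.Int.bitCount_zero]
      · intro h
        have : PySem.Int.bitCount ((n / 2 : Nat) : Int) = 0 := by omega
        have hz : n / 2 = 0 := (bitCount_eq_zero_iff _).1 this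
        rw [key, hz]

-- ===== VERDICT (by name: the statement is the Claim_ definition above) =====
theorem isgray_spec : Claim_equal_isgray := by
  intro x y _ hpre
  have hz0 : 0 ≤ PySem.Int.bxor x y := hpre
  unfold Spec_isgray isgray isgray_alt
  obtain ⟨n, hn⟩ : ∃ n : Nat, PySem.Int.bxor x y = (n : Int) :=
    ⟨(PySem.Int.bxor x y).toNat, (Int.toNat_of_nonneg hz0).symm⟩
  show (isgrayLoop ((PySem.Int.bxor x y).natAbs + 1) (PySem.Int.bxor x y) 0 == 1) =
      (decide (PySem.Int.bxor x y > 0) &&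
        (PySem.Int.band (PySem.Int.bxor x y) (PySem.Int.bxor x y - 1) == 0))
  rw [hn, isgrayLoop_eq_bitCount _ n 0 (by simp), Int.zero_add]
  rcases Nat.eq_zero_or_pos n with h0 | hpos
  · subst h0
    simp [PySem.Int.bitCount_zero]
  · have hgt : ((n : Int) > 0) := by exact_mod_cast hpos
    have hsub : ((n : Int) - 1) = ((n - 1 : Nat) : Int) := by omega
    rw [hsub, PySem.Int.band_natCast]
    have hiff := land_pred_eq_zero_iff n hpos
    simp only [hgt, decide_true, Bool.true_and]
    rcases Decidable.em (n &&& (n - 1) = 0) with h | h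
    · have hb : PySem.Int.bitCount (n : Int) = 1 := hiff.1 h
      simp [h, hb]
    · have hb : PySem.Int.bitCount (n : Int) ≠ 1 := fun hc => h (hiff.2 hc)
      have hne : ((n &&& (n - 1) : Nat) : Int) ≠ 0 := by exact_mod_cast h
      have hne2 : (PySem.Int.bitCount (n : Int) : Int) ≠ 1 := by exact_mod_cast hb
      simp [hne2]
      exact h
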